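-- pv_equiv track=rewrite | github.com/Alaa-Eldeen-Essam/Tessract_OCR_PDF | layout_OCR/controllers/pipeline_controller.py | _replace_digit_groups
-- ===== SOURCE A (Python) =====
-- def _replace_digit_groups(text: str, digits_text: str) -> str:
--     groups = _extract_digit_groups(digits_text)
--     if not groups:
--         return text
--
--     result: list[str] = []
--     index = 0
--     i = 0
--     while i < len(text):
--         ch = text[i]
--         if _is_digit_or_sep(ch):
--             start = i
--             has_digit = ch.isdigit()
--             i += 1
--             while i < len(text) and _is_digit_or_sep(text[i]):
--                 if text[i].isdigit():
--                     has_digit = True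
--                 i += 1
--             segment = text[start:i]
--             if has_digit and index < len(groups):
--                 result.append(groups[index])
--                 index += 1
--             else:
--                 result.append(segment)
--         else:
--             result.append(ch)
--             i += 1
--     return "".join(result)
--
-- def _extract_digit_groups(text: str) -> list[str]:
--     groups: list[str] = []
--     current: list[str] = []
--     has_digit = False
--     for ch in text:
--         if _is_digit_or_sep(ch):
--             current.append(ch)
--             if ch.isdigit():
--                 has_digit = True
--         else:
--             if current and has_digit:
--                 groups.append("".join(current).strip())
--             current = []
--             has_digit = False
--     if current and has_digit:
--         groups.append("".join(current).strip())
--     return groups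
--
-- def _is_digit_or_sep(ch: str) -> bool:
--     return ch.isdigit() or ch in {".", ",", "-", "/", ":"}
-- ===== SOURCE B (Python) =====
-- def _is_digit_or_sep(ch: str) -> bool:
--     return ch.isdigit() or ch in {".", ",", "-", "/", ":"}
--
--
-- def _extract_digit_groups(text: str) -> list[str]:
--     groups: list[str] = []
--     current: list[str] = []
--     has_digit = False
--     for ch in text:
--         if _is_digit_or_sep(ch):
--             current.append(ch)
--             if ch.isdigit():
--                 has_digit = True
--         else:
--             if current and has_digit:
--                 groups.append("".join(current).strip())
--             current = []
--             has_digit = False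
--     if current and has_digit:
--         groups.append("".join(current).strip())
--     return groups
--
--
-- def _replace_digit_groups(text: str, digits_text: str) -> str:
--     groups = _extract_digit_groups(digits_text)
--     if not groups:
--         return text
--     parts: list[str] = []
--     rest = text
--     for group in groups:
--         d = next((i for i, c in enumerate(rest) if c.isdigit()), None)
--         if d is None:
--             break
--         start = d
--         while start > 0 and _is_digit_or_sep(rest[start - 1]):
--             start -= 1
--         end = d + 1
--         while end < len(rest) and _is_digit_or_sep(rest[end]):
--             end += 1
--         parts.append(rest[:start])
--         parts.append(group)
--         rest = rest[end:]
--     parts.append(rest)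
--     return "".join(parts)
-- ===== Notes on version B (the rewrite author's own statement) =====
-- stated objective: alternative
-- what changed: B never partitions the text into runs: for each extracted group it searches for the next digit character, expands left and right over separator characters to the enclosing run, and stitches together the untouched slice before it, the group and the remaining suffix, so separator-only runs and ordinary text are never classified or materialised per run.
import Mathlib
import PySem

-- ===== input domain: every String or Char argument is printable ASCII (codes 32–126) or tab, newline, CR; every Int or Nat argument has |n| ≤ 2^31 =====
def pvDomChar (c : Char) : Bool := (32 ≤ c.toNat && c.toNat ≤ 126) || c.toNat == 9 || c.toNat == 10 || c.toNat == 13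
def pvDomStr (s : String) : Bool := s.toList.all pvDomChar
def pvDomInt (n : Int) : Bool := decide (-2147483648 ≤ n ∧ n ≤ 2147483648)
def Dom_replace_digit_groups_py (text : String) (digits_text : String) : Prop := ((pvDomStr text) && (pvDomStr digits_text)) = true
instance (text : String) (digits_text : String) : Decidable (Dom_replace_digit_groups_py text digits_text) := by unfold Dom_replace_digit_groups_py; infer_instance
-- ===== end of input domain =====

-- B replaces A's run-classifying scan by a digit-search-and-expand stitcher: for each
-- extracted group it finds the next digit, expands over separators to the enclosing run
-- and splices slices (objective: alternative); same return value, no speed claim.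

-- ===== PORT A =====
-- shared helper _is_digit_or_sep (identical in A and B)
def pvIsDigitOrSep (c : Char) : Bool :=
  PySem.Chars.isdigit c || (c == '.' || c == ',' || c == '-' || c == '/' || c == ':')

-- _extract_digit_groups: for-loop over chars with state (groups, current, has_digit)
-- (identical helper in A and B)
def pvExtractLoop : List Char → List (List Char) → List Char → Bool → List (List Char)
  | [], groups, current, hd =>
      if !current.isEmpty && hd then groups ++ [PySem.Chars.strip current] else groups
  | c :: rest, groups, current, hd =>
      if pvIsDigitOrSep c then
        pvExtractLoop rest groups (current ++ [c]) (hd || PySem.Chars.isdigit c)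
      else
        pvExtractLoop rest
          (if !current.isEmpty && hd then groups ++ [PySem.Chars.strip current] else groups)
          [] false

def pvExtract (cs : List Char) : List (List Char) := pvExtractLoop cs [] [] false

-- A's inner while loop: consume the run, OR-ing isdigit into has_digit;
-- returns (consumed segment tail, has_digit, remaining text)
def pvInnerA : List Char → Bool → List Char × Bool × List Char
  | [], hd => ([], hd, [])
  | c :: rest, hd =>
      if pvIsDigitOrSep c then
        let r := pvInnerA rest (hd || PySem.Chars.isdigit c)
        (c :: r.1, r.2.1, r.2.2)
      else ([], hd, c :: rest)

theorem pvInnerA_len : ∀ (cs : List Char) (hd : Bool), (pvInnerA cs hd).2.2.length ≤ cs.length := by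
  intro cs
  induction cs with
  | nil => intro hd; simp [pvInnerA]
  | cons c rest ih =>
      intro hd
      simp only [pvInnerA]
      split
      · exact Nat.le_succ_of_le (ih _)
      · simp

-- A's outer while loop; `result` materialised as the returned list of appended pieces
def pvLoopA (groups : List (List Char)) : List Char → Nat → List (List Char)
  | [], _ => []
  | c :: rest, index =>
      if pvIsDigitOrSep c then
        let t := pvInnerA rest (PySem.Chars.isdigit c)
        if t.2.1 && decide (index < groups.length) then
          groups.getD index [] :: pvLoopA groups t.2.2 (index + 1)
        else
          (c :: t.1) :: pvLoopA groups t.2.2 index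
      else
        [c] :: pvLoopA groups rest index
  termination_by cs _ => cs.length
  decreasing_by
  · exact Nat.lt_succ_of_le (pvInnerA_len rest _)
  · exact Nat.lt_succ_of_le (pvInnerA_len rest _)
  · simp

def replace_digit_groups_py (text : String) (digits_text : String) : String :=
  let groups := pvExtract digits_text.toList
  if groups.isEmpty then text
  else String.mk (pvLoopA groups text.toList 0).flatten

-- ===== PORT B =====
-- `while start > 0 and _is_digit_or_sep(rest[start-1])`: rest[start-1] is always in
-- range here (start ≤ len rest at every call), so getD is exact
def pvExpandLeft (rest : List Char) : Nat → Nat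
  | 0 => 0
  | s + 1 => if pvIsDigitOrSep (rest.getD s ' ') then pvExpandLeft rest s else s + 1

-- `while end < len(rest) and _is_digit_or_sep(rest[end])`: the bound is checked first,
-- so the getD index is in range whenever it is read
def pvExpandRight (rest : List Char) (e : Nat) : Nat :=
  if e < rest.length then
    if pvIsDigitOrSep (rest.getD e ' ') then pvExpandRight rest (e + 1) else e
  else e
  termination_by rest.length - e
  decreasing_by omega

-- B's for-loop over groups with state (parts, rest); `break` + trailing append = [rest];
-- rest[:start] / rest[end:] are nonnegative in-range slices = take / drop
def pvLoopAlt : List (List Char) → List Char → List (List Char)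
  | [], rest => [rest]
  | g :: gs, rest =>
      match rest.findIdx? PySem.Chars.isdigit with
      | none => [rest]
      | some d =>
          let start := pvExpandLeft rest d
          let e := pvExpandRight rest (d + 1)
          rest.take start :: g :: pvLoopAlt gs (rest.drop e)

def replace_digit_groups_py_alt (text : String) (digits_text : String) : String :=
  let groups := pvExtract digits_text.toList
  if groups.isEmpty then text
  else String.mk (pvLoopAlt groups text.toList).flatten

-- ===== PRECONDITION & SPEC =====
def Spec_replace_digit_groups_py (text : String) (digits_text : String) (out : String) : Prop := out = replace_digit_groups_py_alt text digits_text
instance (text : String) (digits_text : String) (out : String) : Decidable (Spec_replace_digit_groups_py text digits_text out) := by unfold Spec_replace_digit_groups_py; infer_instance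

-- ===== CLAIM (what is proved, stated in full; the proofs are below) =====
def Claim_equal_replace_digit_groups_py : Prop := ∀ (text : String) (digits_text : String), Dom_replace_digit_groups_py text digits_text → Spec_replace_digit_groups_py text digits_text (replace_digit_groups_py text digits_text)

-- ===== LEMMAS AND PROOFS =====

theorem pv_dig_sep {c : Char} (h : PySem.Chars.isdigit c = true) : pvIsDigitOrSep c = true := by
  simp [pvIsDigitOrSep, h]

theorem pvInnerA_spec : ∀ (cs : List Char) (hd : Bool),
    pvInnerA cs hd = (cs.takeWhile pvIsDigitOrSep,
      hd || (cs.takeWhile pvIsDigitOrSep).any PySem.Chars.isdigit,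
      cs.dropWhile pvIsDigitOrSep) := by
  intro cs
  induction cs with
  | nil => intro hd; simp [pvInnerA]
  | cons c rest ih =>
      intro hd
      simp only [pvInnerA]
      by_cases h : pvIsDigitOrSep c = true
      · simp [h, ih, Bool.or_assoc]
      · simp at h
        simp [h]

-- A with its groups exhausted copies the text through unchanged
theorem pvLoopA_exhausted (groups : List (List Char)) :
    ∀ (n : Nat) (cs : List Char) (index : Nat), cs.length ≤ n → groups.length ≤ index →
      (pvLoopA groups cs index).flatten = cs := by
  intro n
  induction n with
  | zero =>
      intro cs index hlen _
      have : cs = [] := List.eq_nil_of_length_eq_zero (Nat.le_zero.mp hlen)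
      subst this; simp [pvLoopA]
  | succ n ih =>
      intro cs index hlen hidx
      match cs with
      | [] => simp [pvLoopA]
      | c :: rest =>
        have hrest : rest.length ≤ n := Nat.lt_succ_iff.mp hlen
        rw [pvLoopA]
        by_cases hsep : pvIsDigitOrSep c = true
        · simp only [hsep, if_true, pvInnerA_spec]
          have hcond : decide (index < groups.length) = false := by
            simp; omega
          simp only [hcond, Bool.and_false, Bool.false_eq_true, if_false]
          simp only [List.flatten_cons]
          rw [ih _ _ (le_trans (List.Sublist.length_le (List.dropWhile_sublist _)) hrest) hidx]
          simp [List.takeWhile_append_dropWhile]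
        · simp only [hsep, Bool.false_eq_true, if_false, List.flatten_cons]
          rw [ih _ _ hrest hidx]
          simp

-- one-step unfold lemmas for the expansion loops
theorem pvExpandLeft_succ (cs : List Char) (s : Nat) :
    pvExpandLeft cs (s + 1)
      = if pvIsDigitOrSep (cs.getD s ' ') = true then pvExpandLeft cs s else s + 1 := rfl

theorem pvExpandRight_unfold (rest : List Char) (e : Nat) :
    pvExpandRight rest e =
      if e < rest.length then
        (if pvIsDigitOrSep (rest.getD e ' ') = true then pvExpandRight rest (e + 1) else e)
      else e := by
  conv_lhs => rw [pvExpandRight]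

-- expanding left stops at 0 when every lower index is a separator
theorem pvExpandLeft_zero (cs : List Char) :
    ∀ s, (∀ i, i < s → pvIsDigitOrSep (cs.getD i ' ') = true) → pvExpandLeft cs s = 0 := by
  intro s
  induction s with
  | zero => intro _; rfl
  | succ s ih =>
      intro h
      rw [pvExpandLeft_succ, if_pos (h s (Nat.lt_succ_self s))]
      exact ih (fun i hi => h i (Nat.lt_succ_of_lt hi))

-- shifting the left expansion over one non-separator character
theorem pvExpandLeft_cons (c : Char) (rest : List Char) (hc : pvIsDigitOrSep c = false) :
    ∀ s, pvExpandLeft (c :: rest) (s + 1) = pvExpandLeft rest s + 1 := by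
  intro s
  induction s with
  | zero =>
      rw [pvExpandLeft_succ (c :: rest) 0, List.getD_cons_zero, hc]
      simp [pvExpandLeft]
  | succ s ih =>
      rw [pvExpandLeft_succ (c :: rest) (s + 1), pvExpandLeft_succ rest s, List.getD_cons_succ]
      by_cases h : pvIsDigitOrSep (rest.getD s ' ') = true
      · rw [if_pos h, if_pos h, ih]
      · rw [if_neg h, if_neg h]

-- shifting the left expansion over an all-separator prefix, given the suffix starts non-sep
theorem pvExpandLeft_append (u v : List Char)
    (hu : ∀ x ∈ u, pvIsDigitOrSep x = true)
    (hv : pvIsDigitOrSep (v.getD 0 ' ') = false) :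
    ∀ s, pvExpandLeft (u ++ v) (u.length + s + 1) = u.length + pvExpandLeft v (s + 1) := by
  have hgetD : ∀ i : Nat, (u ++ v).getD (u.length + i) ' ' = v.getD i ' ' := by
    intro i
    simp [List.getD_eq_getElem?_getD, List.getElem?_append]
  intro s
  induction s with
  | zero =>
      rw [pvExpandLeft_succ (u ++ v) (u.length + 0), pvExpandLeft_succ v 0, hgetD 0, hv]
      simp
  | succ s ih =>
      have h1 : u.length + (s + 1) + 1 = (u.length + (s + 1)) + 1 := rfl
      rw [show u.length + (s + 1) + 1 = (u.length + (s + 1)) + 1 from rfl,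
        pvExpandLeft_succ (u ++ v) (u.length + (s + 1)), pvExpandLeft_succ v (s + 1),
        hgetD (s + 1)]
      by_cases h : pvIsDigitOrSep (v.getD (s + 1) ' ') = true
      · rw [if_pos h, if_pos h]
        rw [show u.length + (s + 1) = u.length + s + 1 from by omega]
        exact ih
      · rw [if_neg h, if_neg h]
        omega

-- shifting the right expansion over an arbitrary prefix
theorem pvExpandRight_append (u v : List Char) :
    ∀ (k e : Nat), v.length - e ≤ k →
      pvExpandRight (u ++ v) (u.length + e) = u.length + pvExpandRight v e := by
  intro k
  induction k with
  | zero =>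
      intro e hk
      rw [pvExpandRight_unfold (u ++ v), pvExpandRight_unfold v]
      rw [if_neg (by simp only [List.length_append]; omega), if_neg (by omega)]
  | succ k ih =>
      intro e hk
      rw [pvExpandRight_unfold (u ++ v), pvExpandRight_unfold v]
      have hgetD : (u ++ v).getD (u.length + e) ' ' = v.getD e ' ' := by
        simp [List.getD_eq_getElem?_getD, List.getElem?_append]
      by_cases h : e < v.length
      · rw [if_pos (by simp only [List.length_append]; omega), if_pos h, hgetD]
        by_cases hs : pvIsDigitOrSep (v.getD e ' ') = true
        · rw [if_pos hs, if_pos hs]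
          have := ih (e + 1) (by omega)
          rw [show u.length + e + 1 = u.length + (e + 1) from by omega, this]
        · rw [if_neg hs, if_neg hs]
      · rw [if_neg (by simp only [List.length_append]; omega), if_neg h]

-- the right expansion stops exactly at m when [e, m) is all separators and m is a boundary
theorem pvExpandRight_stop (cs : List Char) :
    ∀ (k e m : Nat), m - e ≤ k → e ≤ m →
      (∀ i, e ≤ i → i < m → pvIsDigitOrSep (cs.getD i ' ') = true) →
      (m = cs.length ∨ (m < cs.length ∧ pvIsDigitOrSep (cs.getD m ' ') = false)) →
      pvExpandRight cs e = m := by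
  intro k
  induction k with
  | zero =>
      intro e m hk hem _ hb
      have : e = m := by omega
      subst this
      rw [pvExpandRight_unfold]
      rcases hb with h | ⟨h1, h2⟩
      · rw [if_neg (by omega)]
      · rw [if_pos h1, h2]
        simp
  | succ k ih =>
      intro e m hk hem hall hb
      by_cases hcase : e = m
      · subst hcase
        rw [pvExpandRight_unfold]
        rcases hb with h | ⟨h1, h2⟩
        · rw [if_neg (by omega)]
        · rw [if_pos h1, h2]
          simp
      · have hlt : e < m := by omega
        have hm : m ≤ cs.length := by rcases hb with h | ⟨h1, _⟩ <;> omega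
        rw [pvExpandRight_unfold]
        rw [if_pos (by omega), if_pos (hall e (le_refl e) hlt)]
        exact ih (e + 1) m (by omega) (by omega) (fun i hi => hall i (by omega)) hb

-- the found index satisfies the predicate
theorem pv_findIdx?_found {α : Type} {p : α → Bool} (d : α) :
    ∀ (l : List α) (i : Nat), l.findIdx? p = some i → p (l.getD i d) = true := by
  intro l
  induction l with
  | nil => intro i h; simp [List.findIdx?_nil] at h
  | cons x xs ih =>
      intro i h
      rw [List.findIdx?_cons] at h
      by_cases hx : p x = true
      · simp only [hx, if_true, Option.some.injEq] at h
        subst h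
        simpa using hx
      · simp only [hx, Bool.false_eq_true, if_false] at h
        match hf : xs.findIdx? p with
        | none => rw [hf] at h; simp at h
        | some j =>
            rw [hf] at h
            simp only [Option.map_some, Option.some.injEq] at h
            subst h
            simpa [List.getD_cons_succ] using ih j hf

-- prepending a non-separator character to B's loop input
theorem pvLoopAlt_cons_nonsep (c : Char) (hc : pvIsDigitOrSep c = false) :
    ∀ (gs : List (List Char)) (rest : List Char),
      (pvLoopAlt gs (c :: rest)).flatten = c :: (pvLoopAlt gs rest).flatten := by
  intro gs rest
  match gs with
  | [] => simp [pvLoopAlt]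
  | g :: gs' =>
    have hcd : PySem.Chars.isdigit c = false := by
      by_contra h
      simp only [Bool.not_eq_false] at h
      rw [pv_dig_sep h] at hc
      simp at hc
    rw [pvLoopAlt, pvLoopAlt]
    rw [List.findIdx?_cons]
    simp only [hcd, Bool.false_eq_true, if_false]
    match hf : rest.findIdx? PySem.Chars.isdigit with
    | none => simp [List.flatten]
    | some s =>
      simp only [Option.map_some]
      rw [pvExpandLeft_cons c rest hc s]
      have hR : pvExpandRight (c :: rest) (s + 1 + 1) = 1 + pvExpandRight rest (s + 1) := by
        have := pvExpandRight_append [c] rest rest.length (s + 1) (by omega)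
        simpa [show (1 : Nat) + (s + 1) = s + 1 + 1 from by omega] using this
      rw [hR]
      simp only [List.flatten_cons]
      rw [show (1 : Nat) + pvExpandRight rest (s + 1) = pvExpandRight rest (s + 1) + 1 from by omega]
      simp [List.take_succ_cons, List.drop_succ_cons]

-- prepending a digit-free separator run (followed by a non-separator boundary)
theorem pvLoopAlt_run_nodigit (u v : List Char)
    (hu : ∀ x ∈ u, pvIsDigitOrSep x = true)
    (hud : ∀ x ∈ u, PySem.Chars.isdigit x = false)
    (hv : ∀ x ∈ v.head?, pvIsDigitOrSep x = false) :
    ∀ (gs : List (List Char)),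
      (pvLoopAlt gs (u ++ v)).flatten = u ++ (pvLoopAlt gs v).flatten := by
  intro gs
  match gs with
  | [] => simp [pvLoopAlt]
  | g :: gs' =>
    rw [pvLoopAlt, pvLoopAlt]
    rw [List.findIdx?_append]
    have hnone : u.findIdx? PySem.Chars.isdigit = none :=
      List.findIdx?_eq_none_iff.mpr hud
    rw [hnone]
    simp only [Option.none_or]
    match hf : v.findIdx? PySem.Chars.isdigit with
    | none => simp [List.flatten]
    | some d1 =>
      simp only [Option.map_some]
      have hd1len : d1 < v.length := (List.findIdx?_eq_some_iff_findIdx_eq.mp hf).1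
      have hvne : v ≠ [] := by intro h; subst h; simp at hd1len
      have hv0 : pvIsDigitOrSep (v.getD 0 ' ') = false := by
        match v, hvne with
        | x :: v', _ => exact hv x (by simp)
      have hdig : PySem.Chars.isdigit (v.getD d1 ' ') = true := pv_findIdx?_found ' ' v d1 hf
      have hd1pos : 1 ≤ d1 := by
        by_contra h
        have hd0 : d1 = 0 := by omega
        rw [hd0] at hdig
        rw [pv_dig_sep hdig] at hv0
        simp at hv0
      obtain ⟨s, rfl⟩ : ∃ s, d1 = s + 1 := ⟨d1 - 1, by omega⟩
      rw [show s + 1 + u.length = u.length + s + 1 from by omega]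
      rw [pvExpandLeft_append u v hu hv0 s]
      have hR : pvExpandRight (u ++ v) (u.length + s + 1 + 1) = u.length + pvExpandRight v (s + 1 + 1) := by
        have := pvExpandRight_append u v v.length (s + 1 + 1) (by omega)
        rw [show u.length + (s + 1 + 1) = u.length + s + 1 + 1 from by omega] at this
        exact this
      rw [hR]
      have htake : (u ++ v).take (u.length + pvExpandLeft v (s + 1)) = u ++ v.take (pvExpandLeft v (s + 1)) := by
        rw [List.take_append]
        rw [show u.take (u.length + pvExpandLeft v (s + 1)) = u from List.take_of_length_le (by omega)]
        rw [show u.length + pvExpandLeft v (s + 1) - u.length = pvExpandLeft v (s + 1) from by omega]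
      have hdrop : (u ++ v).drop (u.length + pvExpandRight v (s + 1 + 1)) = v.drop (pvExpandRight v (s + 1 + 1)) := by
        rw [List.drop_append]
        rw [show u.drop (u.length + pvExpandRight v (s + 1 + 1)) = [] from List.drop_of_length_le (by omega)]
        rw [show u.length + pvExpandRight v (s + 1 + 1) - u.length = pvExpandRight v (s + 1 + 1) from by omega]
        exact List.nil_append _
      rw [htake, hdrop]
      simp [List.flatten_cons]

-- B's step on a text starting with a digit-containing separator run
theorem pvLoopAlt_digit_run (c : Char) (rest : List Char)
    (hsep : pvIsDigitOrSep c = true)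
    (hd : (PySem.Chars.isdigit c || (rest.takeWhile pvIsDigitOrSep).any PySem.Chars.isdigit) = true) :
    ∀ (g : List Char) (gs' : List (List Char)),
      (pvLoopAlt (g :: gs') (c :: rest)).flatten
        = g ++ (pvLoopAlt gs' (rest.dropWhile pvIsDigitOrSep)).flatten := by
  intro g gs'
  have hcs : c :: rest = (c :: rest.takeWhile pvIsDigitOrSep) ++ rest.dropWhile pvIsDigitOrSep := by
    simp [List.takeWhile_append_dropWhile]
  have hseg_sep : ∀ x ∈ (c :: rest.takeWhile pvIsDigitOrSep), pvIsDigitOrSep x = true := by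
    intro x hx
    rcases List.mem_cons.mp hx with h | h
    · subst h; exact hsep
    · exact List.mem_takeWhile_imp h
  have hany : (c :: rest.takeWhile pvIsDigitOrSep).any PySem.Chars.isdigit = true := by
    simpa [List.any_cons] using hd
  have hsome : ((c :: rest).findIdx? PySem.Chars.isdigit).isSome = true := by
    rw [List.findIdx?_isSome]
    rw [hcs, List.any_append]
    simp [hany]
  match hf : (c :: rest).findIdx? PySem.Chars.isdigit with
  | none => rw [hf] at hsome; simp at hsome
  | some d0 =>
    have hd0lt : d0 < (c :: rest.takeWhile pvIsDigitOrSep).length := by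
      rw [hcs, List.findIdx?_append] at hf
      match hf1 : (c :: rest.takeWhile pvIsDigitOrSep).findIdx? PySem.Chars.isdigit with
      | none =>
          have hs1 : ((c :: rest.takeWhile pvIsDigitOrSep).findIdx? PySem.Chars.isdigit).isSome = true := by
            rw [List.findIdx?_isSome]; exact hany
          rw [hf1] at hs1; simp at hs1
      | some j =>
          rw [hf1, Option.some_or] at hf
          have hj := (List.findIdx?_eq_some_iff_findIdx_eq.mp hf1).1
          have hjd : j = d0 := by injection hf
          omega
    have hgetrun : ∀ i, i < (c :: rest.takeWhile pvIsDigitOrSep).length →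
        pvIsDigitOrSep ((c :: rest).getD i ' ') = true := by
      intro i hi
      rw [hcs, List.getD_eq_getElem?_getD, List.getElem?_append, if_pos hi]
      rw [← List.getD_eq_getElem?_getD]
      rw [List.getD_eq_getElem _ _ hi]
      exact hseg_sep _ (List.getElem_mem hi)
    rw [pvLoopAlt, hf]
    simp only [List.flatten_cons]
    have hEL : pvExpandLeft (c :: rest) d0 = 0 :=
      pvExpandLeft_zero _ d0 (fun i hi => hgetrun i (by omega))
    have hER : pvExpandRight (c :: rest) (d0 + 1) = (c :: rest.takeWhile pvIsDigitOrSep).length := by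
      apply pvExpandRight_stop (c :: rest) ((c :: rest).length) (d0 + 1) _ (by
        simp only [List.length_cons]
        have htw : (rest.takeWhile pvIsDigitOrSep).length ≤ rest.length :=
          List.Sublist.length_le (List.takeWhile_sublist _)
        omega) (by omega) (fun i _ h2 => hgetrun i h2)
      match hdw : rest.dropWhile pvIsDigitOrSep with
      | [] =>
          left
          rw [hcs, hdw]
          simp
      | y :: ys =>
          right
          constructor
          · rw [hcs, hdw]
            simp [List.length_append]
          · have hy : pvIsDigitOrSep y = false := by
              have hh := List.head?_dropWhile_not pvIsDigitOrSep rest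
              rw [hdw] at hh
              simpa using hh
            rw [hcs, hdw, List.getD_eq_getElem?_getD, List.getElem?_append,
              if_neg (by omega)]
            simp only [Nat.sub_self, List.getElem?_cons_zero]
            simpa using hy
    rw [hEL, hER]
    simp only [List.take_zero]
    rw [hcs, List.drop_left]
    simp [List.flatten_cons]

theorem pvLoopAlt_nil_flatten : ∀ gs : List (List Char), (pvLoopAlt gs ([] : List Char)).flatten = [] := by
  intro gs
  cases gs <;> simp [pvLoopAlt, List.findIdx?_nil]

theorem pvLoop_eq (groups : List (List Char)) :
    ∀ (n : Nat) (cs : List Char) (index : Nat), cs.length ≤ n →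
      (pvLoopA groups cs index).flatten = (pvLoopAlt (groups.drop index) cs).flatten := by
  intro n
  induction n with
  | zero =>
      intro cs index hlen
      have : cs = [] := List.eq_nil_of_length_eq_zero (Nat.le_zero.mp hlen)
      subst this
      simp [pvLoopA, pvLoopAlt_nil_flatten]
  | succ n ih =>
      intro cs index hlen
      match cs with
      | [] => simp [pvLoopA, pvLoopAlt_nil_flatten]
      | c :: rest =>
        have hrest : rest.length ≤ n := Nat.lt_succ_iff.mp hlen
        rcases hdrop : groups.drop index with _ | ⟨g, gs'⟩
        · have hidx : groups.length ≤ index := List.drop_eq_nil_iff.mp hdrop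
          rw [pvLoopA_exhausted groups (n + 1) _ index hlen hidx]
          simp [pvLoopAlt]
        · have hidx : index < groups.length := by
            by_contra h
            rw [List.drop_eq_nil_of_le (by omega)] at hdrop
            exact absurd hdrop (by simp)
          by_cases hsep : pvIsDigitOrSep c = true
          · rw [pvLoopA]
            simp only [hsep, if_true, pvInnerA_spec]
            have hrdw : (rest.dropWhile pvIsDigitOrSep).length ≤ n :=
              le_trans (List.Sublist.length_le (List.dropWhile_sublist _)) hrest
            by_cases hd : (PySem.Chars.isdigit c || (rest.takeWhile pvIsDigitOrSep).any PySem.Chars.isdigit) = true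
            · simp only [hd, Bool.true_and, hidx, decide_true, if_true]
              have hg : groups.getD index [] = g := by
                have h0 : (groups.drop index)[0]? = groups[index]? := by
                  rw [List.getElem?_drop]
                  simp
                rw [List.getD_eq_getElem?_getD, ← h0, hdrop]
                rfl
              have hdrop1 : groups.drop (index + 1) = gs' := by
                have hdd : (groups.drop index).drop 1 = groups.drop (index + 1) := by
                  rw [List.drop_drop]
                rw [← hdd, hdrop]
                rfl
              rw [pvLoopAlt_digit_run c rest hsep hd g gs']
              simp only [List.flatten_cons, hg]
              rw [ih _ _ hrdw, hdrop1]
            · have hd' : (PySem.Chars.isdigit c || (rest.takeWhile pvIsDigitOrSep).any PySem.Chars.isdigit) = false := by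
                simpa using hd
              simp only [hd', Bool.false_and, Bool.false_eq_true, if_false]
              have hcs : c :: rest = (c :: rest.takeWhile pvIsDigitOrSep) ++ rest.dropWhile pvIsDigitOrSep := by
                simp [List.takeWhile_append_dropWhile]
              have hrun := pvLoopAlt_run_nodigit (c :: rest.takeWhile pvIsDigitOrSep) (rest.dropWhile pvIsDigitOrSep)
                (by
                  intro x hx
                  rcases List.mem_cons.mp hx with h | h
                  · subst h; exact hsep
                  · exact List.mem_takeWhile_imp h)
                (by
                  intro x hx
                  simp only [Bool.or_eq_false_iff] at hd'
                  rcases List.mem_cons.mp hx with h | h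
                  · subst h
                    exact hd'.1
                  · by_contra hxx
                    simp only [Bool.not_eq_false] at hxx
                    have hx2 := List.any_eq_true.mpr ⟨x, h, hxx⟩
                    rw [hd'.2] at hx2
                    simp at hx2)
                (by
                  intro x hx
                  have hh := List.head?_dropWhile_not pvIsDigitOrSep rest
                  match hdw : (rest.dropWhile pvIsDigitOrSep).head? with
                  | none => rw [hdw] at hx; simp at hx
                  | some y =>
                      rw [hdw] at hx hh
                      simp only [Option.mem_def, Option.some.injEq] at hx
                      subst hx
                      simpa using hh)
                (g :: gs')
              rw [hcs, hrun]
              simp only [List.flatten_cons]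
              rw [ih _ _ hrdw, hdrop]
          · rw [pvLoopA]
            simp only [hsep, Bool.false_eq_true, if_false, List.flatten_cons]
            rw [pvLoopAlt_cons_nonsep c (by simpa using hsep) (g :: gs') rest]
            rw [ih rest index hrest, hdrop]
            simp

-- ===== VERDICT (by name: the statement is the Claim_ definition above) =====
theorem replace_digit_groups_py_spec : Claim_equal_replace_digit_groups_py := by
  intro text digits_text _
  unfold Spec_replace_digit_groups_py replace_digit_groups_py replace_digit_groups_py_alt
  by_cases h : (pvExtract digits_text.toList).isEmpty
  · simp [h]
  · simp only [h, if_false, Bool.false_eq_true]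
    rw [pvLoop_eq _ text.toList.length text.toList 0 (le_refl _)]
    simp
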